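-- pv_equiv track=rewrite | github.com/SIDN/workbench | tools/generators/delegations.py | create_delegations_zonelist
-- ===== SOURCE A (Python) =====
-- delegation_servers = [
--     "bind9",
--     "bind10",
--     "nsd",
--     "nsd4",
--     "powerdns",
--     "knot",
--     "yadifa"
-- ]
--
-- def create_delegations_zonelist(name, depth):
--     if depth <= 0:
--         raise Exception("depth must be positive")
--     zonelist = []
--     zonelist.append(name)
--     if depth > 1:
--         for delname in delegation_servers:
--             zonelist.extend(create_delegations_zonelist(delname + "." + name, depth-1))
--     return zonelist
-- ===== SOURCE B (Python) =====
-- delegation_servers = [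
--     "bind9",
--     "bind10",
--     "nsd",
--     "nsd4",
--     "powerdns",
--     "knot",
--     "yadifa"
-- ]
--
-- def create_delegations_zonelist(name, depth):
--     if depth <= 0:
--         raise Exception("depth must be positive")
--     zonelist = []
--     stack = [(name, depth)]
--     while stack:
--         cur, d = stack.pop()
--         zonelist.append(cur)
--         if d > 1:
--             # push children in reversed server order so they are popped in original order
--             stack.extend((s + "." + cur, d - 1) for s in reversed(delegation_servers))
--     return zonelist
-- ===== Notes on version B (the rewrite author's own statement) =====
-- stated objective: alternative
-- what changed: Replaces the recursive DFS (recursion per zone, list extend per child) with an explicit-stack iterative loop that produces the same preorder sequence by pushing children in reversed server order.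
import Mathlib
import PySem

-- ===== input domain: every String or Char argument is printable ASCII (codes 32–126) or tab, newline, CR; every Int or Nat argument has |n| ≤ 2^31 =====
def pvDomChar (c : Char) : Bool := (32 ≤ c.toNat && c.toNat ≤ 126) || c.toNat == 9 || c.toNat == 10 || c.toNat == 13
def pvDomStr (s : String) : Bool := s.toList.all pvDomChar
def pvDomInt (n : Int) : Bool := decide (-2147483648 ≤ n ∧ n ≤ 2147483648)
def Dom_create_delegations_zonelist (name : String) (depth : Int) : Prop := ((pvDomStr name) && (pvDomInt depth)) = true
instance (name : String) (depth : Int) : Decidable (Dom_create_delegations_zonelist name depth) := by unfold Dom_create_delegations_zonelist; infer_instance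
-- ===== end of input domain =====

-- B replaces A's recursion with an explicit-stack iterative loop producing the same preorder list (alternative decomposition, same cost).
-- A raises on depth <= 0; those inputs are excluded by Pre_ (B raises there too).

def delegation_servers : List String :=
  ["bind9", "bind10", "nsd", "nsd4", "powerdns", "knot", "yadifa"]

-- ===== PORT A =====
-- A's recursion, with the (excluded) raising case depth <= 0 mapped to []; fuel = depth.toNat is exact on Pre_.
-- The 'for delname in delegation_servers: zonelist.extend(...)' loop is the structural recursion cdzA_loop
-- over the server list, concatenating the recursive results in order.
mutual
def cdzA : Nat → String → List String
  | 0, _ => []                -- depth <= 0: Python raises (outside Pre_)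
  | Nat.succ n, name =>
      name :: (if 1 ≤ n then cdzA_loop n delegation_servers name else [])
termination_by n _ => (n, 0)
def cdzA_loop : Nat → List String → String → List String
  | _, [], _ => []
  | n, delname :: rest, name => cdzA n (delname ++ "." ++ name) ++ cdzA_loop n rest name
termination_by n l _ => (n, l.length + 1)
end

def create_delegations_zonelist (name : String) (depth : Int) : List String :=
  if depth ≤ 0 then [] else cdzA depth.toNat name

-- ===== PORT B =====
-- Source B's while-loop over an explicit stack. The Lean list's HEAD is the stack TOP (Python's last element),
-- so Python's 'extend with reversed(delegation_servers) then pop from the end' is prepending the children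
-- in original server order.
-- Termination measure lemma for cdzB's stack loop (cited by name in decreasing_by).
theorem cdzB_dec (cur : String) (d : Nat) (rest : List (String × Nat)) :
    (((if 1 < d then delegation_servers.map (fun s => (s ++ "." ++ cur, d - 1)) else []) ++ rest).map
        (fun p => 8 ^ p.2)).sum
      < (((cur, d) :: rest).map (fun p => (8:Nat) ^ p.2)).sum := by
  simp only [List.map_append, List.sum_append, List.map_cons, List.sum_cons]
  split
  · next h1 =>
    have hmap : (List.map (fun p => (8:Nat) ^ p.2) (List.map (fun s => (s ++ "." ++ cur, d - 1)) delegation_servers)).sum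
        = 7 * 8 ^ (d - 1) := by simp [delegation_servers]; ring
    rw [hmap]
    have hd : d - 1 + 1 = d := by omega
    have h8 : (8:Nat) ^ d = 8 ^ (d - 1) * 8 := by
      conv_lhs => rw [← hd]
      rw [pow_succ]
    have hp : 0 < (8:Nat) ^ (d - 1) := Nat.pow_pos (by omega)
    omega
  · have hp : 0 < (8:Nat) ^ d := Nat.pow_pos (by omega)
    simp only [List.map_nil, List.sum_nil]
    omega

def cdzB (stack : List (String × Nat)) (zonelist : List String) : List String :=
  match stack with
  | [] => zonelist
  | (cur, d) :: rest =>
      cdzB ((if 1 < d then delegation_servers.map (fun s => (s ++ "." ++ cur, d - 1)) else []) ++ rest)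
           (zonelist ++ [cur])
termination_by (stack.map (fun p => 8 ^ p.2)).sum
decreasing_by exact cdzB_dec cur d rest

def create_delegations_zonelist_alt (name : String) (depth : Int) : List String :=
  if depth ≤ 0 then [] else cdzB [(name, depth.toNat)] []

-- ===== PRECONDITION & SPEC =====
-- Pre_ excludes exactly depth <= 0, where Python A raises Exception("depth must be positive").
def Pre_create_delegations_zonelist (name : String) (depth : Int) : Prop := 1 ≤ depth
instance (name : String) (depth : Int) : Decidable (Pre_create_delegations_zonelist name depth) := by unfold Pre_create_delegations_zonelist; infer_instance
def pvWitness_create_delegations_zonelist : String × Int := ("nl", 2)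

def Spec_create_delegations_zonelist (name : String) (depth : Int) (out : List String) : Prop := out = create_delegations_zonelist_alt name depth
instance (name : String) (depth : Int) (out : List String) : Decidable (Spec_create_delegations_zonelist name depth out) := by unfold Spec_create_delegations_zonelist; infer_instance

-- ===== CLAIM (what is proved, stated in full; the proofs are below) =====
def Claim_equal_create_delegations_zonelist : Prop := ∀ (name : String) (depth : Int), Dom_create_delegations_zonelist name depth → Pre_create_delegations_zonelist name depth → Spec_create_delegations_zonelist name depth (create_delegations_zonelist name depth)

-- ===== LEMMAS AND PROOFS =====

-- The inner server loop of A is the flatMap of the recursion over the server list.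
theorem cdzA_loop_eq (n : Nat) (l : List String) (name : String) :
    cdzA_loop n l name = l.flatMap (fun s => cdzA n (s ++ "." ++ name)) := by
  induction l with
  | nil => simp [cdzA_loop]
  | cons d rest ih => simp [cdzA_loop, ih]

-- Loop invariant: B's stack loop emits, after the accumulator, A's preorder output of each stack entry in order.
theorem cdzB_eq (stack : List (String × Nat)) (zonelist : List String) :
    (∀ p ∈ stack, 1 ≤ p.2) →
    cdzB stack zonelist = zonelist ++ stack.flatMap (fun p => cdzA p.2 p.1) := by
  induction stack, zonelist using cdzB.induct with
  | case1 z => simp [cdzB]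
  | case2 z cur d rest ih =>
    intro h
    have hd : 1 ≤ d := h (cur, d) (by simp)
    rw [cdzB]
    by_cases h1 : 1 < d
    · have hrec : ∀ p ∈ (delegation_servers.map fun s => (s ++ "." ++ cur, d - 1)) ++ rest, 1 ≤ p.2 := by
        intro p hp
        rcases List.mem_append.1 hp with hp | hp
        · rcases List.mem_map.1 hp with ⟨s, _, rfl⟩; simp; omega
        · exact h p (List.mem_cons_of_mem _ hp)
      rw [dif_pos h1] at ih
      rw [if_pos h1, ih hrec, List.flatMap_append, List.flatMap_cons]
      obtain ⟨m, rfl⟩ : ∃ m, d = m + 1 := ⟨d - 1, by omega⟩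
      have hm : 1 ≤ m := by omega
      simp only [Nat.add_sub_cancel]
      simp [cdzA, hm, cdzA_loop_eq, List.flatMap_map, List.append_assoc]
    · have hd1 : d = 1 := by omega
      rw [dif_neg h1] at ih
      rw [if_neg h1]
      simp only [List.nil_append] at ih ⊢
      rw [ih (fun p hp => h p (List.mem_cons_of_mem _ hp)), List.flatMap_cons]
      subst hd1
      simp [cdzA, List.append_assoc]

-- ===== VERDICT (by name: the statement is the Claim_ definition above) =====
theorem create_delegations_zonelist_spec : Claim_equal_create_delegations_zonelist := by
  intro name depth _ hpre
  unfold Spec_create_delegations_zonelist create_delegations_zonelist create_delegations_zonelist_alt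
  have hnot : ¬ depth ≤ 0 := by unfold Pre_create_delegations_zonelist at hpre; omega
  rw [if_neg hnot, if_neg hnot, cdzB_eq]
  · simp
  · intro p hp
    simp only [List.mem_singleton] at hp
    subst hp
    unfold Pre_create_delegations_zonelist at hpre
    simp; omega
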